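-- pv_equiv track=rewrite | github.com/mauriceling/copads | copads/jigsaw.py | reversePartBlock2
-- ===== SOURCE A (Python) =====
-- def reversePartBlock2(block, slength, elength):
--     '''
--     Function to reverse from M-th to N-th length of a string or
--     a list where M < N. If M is zero or less than zero, reversal will
--     start from the first element. If N is equal or more than the length
--     of the block, the entire block from M will be reversed.
--
--     @param block: data to be reversed.
--     @type block: string
--     @param slength: number of M-th items (from the front) to start
--     reversing.
--     @type slength: integer
--     @param elength: number of N-th items (from the front) to start
--     reversing.
--     @type elength: integer
--     @return: reversed block
--     '''
--     slength = abs(int(slength))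
--     elength = abs(int(elength))
--     if slength < 0:
--         slength = 0
--     if elength > len(block) - 1:
--         elength = len(block) - 1
--     if elength < slength:
--         elength = slength
--     block = [item for item in block]
--     rblock = block[slength:elength]
--     rblock.reverse()
--     block = block[:slength] + rblock + block[elength:]
--     return ''.join(block)
-- ===== SOURCE B (Python) =====
-- def reversePartBlock2(block, slength, elength):
--     # In-place two-pointer reversal of the sub-range instead of
--     # slice-reverse-concatenate; same index clamping as the original.
--     slength = abs(int(slength))
--     elength = abs(int(elength))
--     if slength < 0:
--         slength = 0
--     if elength > len(block) - 1:
--         elength = len(block) - 1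
--     if elength < slength:
--         elength = slength
--     buf = [item for item in block]
--     i = slength
--     j = elength - 1
--     while i < j:
--         buf[i], buf[j] = buf[j], buf[i]
--         i += 1
--         j -= 1
--     return ''.join(buf)
-- ===== Notes on version B (the rewrite author's own statement) =====
-- stated objective: alternative
-- what changed: Replaces the slice-reverse-and-concatenate (which builds four intermediate lists) with an in-place two-pointer swap loop over a single buffer, keeping the original index-clamping.
import Mathlib
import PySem

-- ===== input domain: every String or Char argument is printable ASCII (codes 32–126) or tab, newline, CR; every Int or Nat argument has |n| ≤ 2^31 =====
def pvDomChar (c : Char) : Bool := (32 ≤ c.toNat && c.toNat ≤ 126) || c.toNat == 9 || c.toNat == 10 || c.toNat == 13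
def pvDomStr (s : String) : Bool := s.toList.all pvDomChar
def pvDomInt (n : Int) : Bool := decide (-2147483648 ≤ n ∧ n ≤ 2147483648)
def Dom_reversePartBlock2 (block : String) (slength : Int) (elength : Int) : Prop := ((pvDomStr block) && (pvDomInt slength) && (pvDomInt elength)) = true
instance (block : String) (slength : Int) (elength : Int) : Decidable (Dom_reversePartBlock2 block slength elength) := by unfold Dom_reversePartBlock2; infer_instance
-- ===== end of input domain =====

-- B replaces A's slice-reverse-concatenate with an in-place two-pointer swap loop over a single buffer (alternative decomposition, same asymptotic cost); same return value.


-- ===== PORT A =====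
def reversePartBlock2 (block : String) (slength : Int) (elength : Int) : String :=
  let slength := |slength|
  let elength := |elength|
  let slength := if slength < 0 then 0 else slength
  let L : List Char := block.toList
  let elength := if elength > (L.length : Int) - 1 then (L.length : Int) - 1 else elength
  let elength := if elength < slength then slength else elength
  let rblock := PySem.List.slice L (some slength) (some elength)
  let rblock := rblock.reverse
  let L := PySem.List.slice L none (some slength) ++ rblock ++ PySem.List.slice L (some elength) none
  String.ofList L

-- ===== PORT B =====
-- the while loop of Source B; both pointers stay nonnegative on every reachable state
-- (i starts at the clamped nonnegative slength and only grows, the loop stops before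
-- j drops under i), so .toNat is exact here
def pvSwapLoop (buf : List Char) (i j : Int) : List Char :=
  if i < j then
    let ci := buf.getD i.toNat ' '
    let cj := buf.getD j.toNat ' '
    pvSwapLoop ((buf.set i.toNat cj).set j.toNat ci) (i + 1) (j - 1)
  else buf
termination_by (j - i).toNat
decreasing_by omega

def reversePartBlock2_alt (block : String) (slength : Int) (elength : Int) : String :=
  let slength := |slength|
  let elength := |elength|
  let slength := if slength < 0 then 0 else slength
  let buf : List Char := block.toList
  let elength := if elength > (buf.length : Int) - 1 then (buf.length : Int) - 1 else elength
  let elength := if elength < slength then slength else elength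
  String.ofList (pvSwapLoop buf slength (elength - 1))

-- ===== PRECONDITION & SPEC =====
def Spec_reversePartBlock2 (block : String) (slength : Int) (elength : Int) (out : String) : Prop := out = reversePartBlock2_alt block slength elength
instance (block : String) (slength : Int) (elength : Int) (out : String) : Decidable (Spec_reversePartBlock2 block slength elength out) := by unfold Spec_reversePartBlock2; infer_instance

-- ===== CLAIM (what is proved, stated in full; the proofs are below) =====
def Claim_equal_reversePartBlock2 : Prop := ∀ (block : String) (slength : Int) (elength : Int), Dom_reversePartBlock2 block slength elength → Spec_reversePartBlock2 block slength elength (reversePartBlock2 block slength elength)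

-- ===== LEMMAS AND PROOFS =====

-- when the loop does not run (i = j or i = j + 1) the segment decomposition is the list itself
theorem pvSwapLoop_stop (l : List Char) (a b : Nat) (hab : a ≤ b + 1) (hba : b ≤ a)
    (hb : b < l.length) :
    pvSwapLoop l (a : Int) (b : Int) =
      l.take a ++ ((l.drop a).take (b + 1 - a)).reverse ++ l.drop (b + 1) := by
  rw [pvSwapLoop, if_neg (by omega)]
  rcases (by omega : a = b ∨ a = b + 1) with h | h
  · subst h
    rw [show a + 1 - a = 1 by omega, List.drop_eq_getElem_cons hb, List.take_succ_cons,
      List.take_zero, List.reverse_singleton, List.append_assoc, List.singleton_append,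
      ← List.drop_eq_getElem_cons hb, List.take_append_drop]
  · subst h
    rw [Nat.sub_self, List.take_zero, List.reverse_nil, List.append_nil,
      List.take_append_drop]

-- the two-pointer loop reverses exactly the segment [a, b] of the buffer
theorem pvSwapLoop_eq (n : Nat) : ∀ (l : List Char) (a b : Nat),
    b - a ≤ n → a ≤ b + 1 → b < l.length →
    pvSwapLoop l (a : Int) (b : Int) =
      l.take a ++ ((l.drop a).take (b + 1 - a)).reverse ++ l.drop (b + 1) := by
  induction n with
  | zero =>
    intro l a b hn ha hb
    exact pvSwapLoop_stop l a b ha (by omega) hb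
  | succ n ih =>
    intro l a b hn ha hb
    by_cases hab : b ≤ a
    · exact pvSwapLoop_stop l a b ha hab hb
    · have hlt : a < b := by omega
      have halen : a < l.length := by omega
      rw [pvSwapLoop, if_pos (by exact_mod_cast hlt)]
      simp only [Int.toNat_natCast]
      rw [List.getD_eq_getElem l ' ' halen, List.getD_eq_getElem l ' ' hb]
      rw [show (a : Int) + 1 = ((a + 1 : Nat) : Int) by push_cast; ring,
          show (b : Int) - 1 = ((b - 1 : Nat) : Int) by omega,
          ih ((l.set a l[b]).set b l[a]) (a+1) (b-1) (by omega) (by omega) (by simp; omega)]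
      have fA : ((l.set a l[b]).set b l[a]).take (a+1) = l.take a ++ [l[b]] := by
        apply List.ext_getElem
        · simp; omega
        · intro k hk1 hk2
          simp only [List.length_take, List.length_set, List.length_append,
            List.length_singleton] at hk1 hk2
          simp only [List.getElem_take, List.getElem_set, List.getElem_append,
            List.length_take]
          split_ifs <;> first | rfl | omega | (simp only [List.getElem_singleton])
      have fB : (((l.set a l[b]).set b l[a]).drop (a+1)).take (b-1+1-(a+1)) =
          (l.drop (a+1)).take (b-(a+1)) := by
        apply List.ext_getElem
        · simp; omega
        · intro k hk1 hk2
          simp only [List.length_take, List.length_drop, List.length_set] at hk1 hk2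
          simp only [List.getElem_take, List.getElem_drop, List.getElem_set]
          split_ifs <;> first | rfl | omega
      have fC : ((l.set a l[b]).set b l[a]).drop (b-1+1) = l[a] :: l.drop (b+1) := by
        apply List.ext_getElem
        · simp; omega
        · intro k hk1 hk2
          simp only [List.length_drop, List.length_set] at hk1
          rcases k with _ | k
          · simp only [List.getElem_drop, List.getElem_set, List.getElem_cons_zero]
            split_ifs <;> first | rfl | omega
          · simp only [List.getElem_drop, List.getElem_set, List.getElem_cons_succ]
            split_ifs <;> (congr 1; omega)
      have fD : (l.drop a).take (b+1-a) =
          l[a] :: (((l.drop (a+1)).take (b-(a+1))) ++ [l[b]]) := by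
        rw [List.drop_eq_getElem_cons halen, show b+1-a = (b-a)+1 by omega, List.take_succ_cons,
          show b-a = (b-(a+1))+1 by omega, List.take_add_one]
        congr 2
        rw [List.getElem?_drop, show a+1+(b-(a+1)) = b by omega,
          List.getElem?_eq_getElem hb, Option.toList_some]
      rw [fA, fB, fC, fD]
      simp [List.reverse_append]

-- core equality at the list level, for the clamped indices both programs compute
theorem core_eq (l : List Char) (s e : Int) (hs : 0 ≤ s) (hse : s ≤ e)
    (he : s < e → e ≤ (l.length : Int) - 1) :
    PySem.List.slice l none (some s) ++ (PySem.List.slice l (some s) (some e)).reverse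
        ++ PySem.List.slice l (some e) none
      = pvSwapLoop l s (e - 1) := by
  rcases eq_or_lt_of_le hse with h | h
  · subst h
    rw [pvSwapLoop, if_neg (by omega)]
    rw [PySem.List.slice_toNat l hs hs, Nat.sub_self, List.take_zero, List.reverse_nil,
      List.append_nil, PySem.List.slice_to l hs, PySem.List.slice_from l hs,
      List.take_append_drop]
  · have he' : e ≤ (l.length : Int) - 1 := he h
    have h0e : 0 ≤ e := le_of_lt (lt_of_le_of_lt hs h)
    rw [show s = ((s.toNat : Nat) : Int) by omega, show e = ((e.toNat : Nat) : Int) by omega,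
      show ((e.toNat : Nat) : Int) - 1 = ((e.toNat - 1 : Nat) : Int) by omega]
    rw [pvSwapLoop_eq (e.toNat - 1 - s.toNat) l s.toNat (e.toNat - 1) (le_refl _)
      (by omega) (by omega)]
    rw [PySem.List.slice_natCast, PySem.List.slice_to_natCast, PySem.List.slice_from_natCast,
      show e.toNat - 1 + 1 = e.toNat by omega]

-- ===== VERDICT (by name: the statement is the Claim_ definition above) =====
theorem reversePartBlock2_spec : Claim_equal_reversePartBlock2 := by
  intro block slength elength _
  unfold Spec_reversePartBlock2 reversePartBlock2 reversePartBlock2_alt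
  simp only [if_neg (not_lt.mpr (abs_nonneg slength))]
  apply congrArg String.ofList
  have h1 := abs_nonneg slength
  have h2 := abs_nonneg elength
  apply core_eq
  · exact h1
  · split_ifs <;> omega
  · intro hlt
    split_ifs at hlt ⊢ <;> omega
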